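-- pv_equiv track=rewrite | github.com/taiduydinh/pypatternminer | pypatternminer/pascal.py | same_as
-- ===== SOURCE A (Python) =====
-- def same_as(itemset1, itemset2, pos_removed) -> int:
--     j = 0
--     for i in range(len(itemset1)):
--         if j == pos_removed:
--             j += 1
--         if itemset1[i] < itemset2[j]:
--             return -1
--         elif itemset1[i] > itemset2[j]:
--             return 1
--         j += 1
--     return 0
-- ===== SOURCE B (Python) =====
-- def same_as(itemset1, itemset2, pos_removed) -> int:
--     filtered = itemset2[:pos_removed] + itemset2[pos_removed + 1:]
--     for i in range(len(itemset1)):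
--         if itemset1[i] < filtered[i]:
--             return -1
--         if itemset1[i] > filtered[i]:
--             return 1
--     return 0
-- ===== Notes on version B (the rewrite author's own statement) =====
-- stated objective: simpler
-- what changed: Replaced A's inline skip-cursor (a second index j that jumps over pos_removed while comparing) by a two-pass decomposition: first materialise the reduced second itemset with two slices, then a plain positional lexicographic loop.
-- outside the precondition, e.g. on same_as([1], [2, 0], -2): A returns -1, B returns 1; on same_as([0, 0], [0, 0], -2): A returns 0, B raises IndexError
import Mathlib
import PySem

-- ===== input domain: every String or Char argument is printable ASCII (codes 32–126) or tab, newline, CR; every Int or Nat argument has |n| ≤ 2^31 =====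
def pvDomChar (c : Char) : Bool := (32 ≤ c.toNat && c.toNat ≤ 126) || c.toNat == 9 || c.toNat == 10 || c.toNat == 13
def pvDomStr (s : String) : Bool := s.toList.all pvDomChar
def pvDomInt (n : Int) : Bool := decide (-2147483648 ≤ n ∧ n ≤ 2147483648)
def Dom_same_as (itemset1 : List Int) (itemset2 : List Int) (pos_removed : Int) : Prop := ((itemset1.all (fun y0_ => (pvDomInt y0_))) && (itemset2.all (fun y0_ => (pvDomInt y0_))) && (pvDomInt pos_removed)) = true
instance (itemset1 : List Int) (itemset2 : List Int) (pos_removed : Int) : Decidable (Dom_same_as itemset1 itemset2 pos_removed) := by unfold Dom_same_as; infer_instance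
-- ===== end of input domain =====

-- B replaces A's inline skip-cursor by precomputing the reduced second itemset with two
-- slices and then running a plain positional lexicographic compare (simpler decomposition).


-- ===== PORT A =====
-- the for-loop of A: recursion over itemset1 (the values itemset1[i] in order), state j
def sameAsLoop (itemset2 : List Int) (pos_removed : Int) : List Int → Int → Int
  | [], _ => 0
  | x :: rest, j =>
    let j' := if j = pos_removed then j + 1 else j
    let y := PySem.List.pyGetD itemset2 j' 0   -- itemset2[j]; in range under Pre_
    if x < y then -1
    else if x > y then 1
    else sameAsLoop itemset2 pos_removed rest (j' + 1)

def same_as (itemset1 : List Int) (itemset2 : List Int) (pos_removed : Int) : Int :=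
  sameAsLoop itemset2 pos_removed itemset1 0

-- ===== PORT B =====
-- the index loop of B: compare itemset1[i] with filtered[i] for i in range(len(itemset1))
def cmpLoop (itemset1 : List Int) (filtered : List Int) (i : Nat) : Int :=
  if h : i < itemset1.length then
    let x := itemset1[i]
    let y := PySem.List.pyGetD filtered (i : Int) 0   -- filtered[i]; in range under Pre_
    if x < y then -1
    else if x > y then 1
    else cmpLoop itemset1 filtered (i + 1)
  else 0
termination_by itemset1.length - i

def same_as_alt (itemset1 : List Int) (itemset2 : List Int) (pos_removed : Int) : Int :=
  let filtered := PySem.List.slice itemset2 none (some pos_removed)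
                    ++ PySem.List.slice itemset2 (some (pos_removed + 1)) none
  cmpLoop itemset1 filtered 0

-- ===== PRECONDITION & SPEC =====
-- Pre_ restricts to a nonnegative pos_removed (negative values are an accidental corner: A's
-- skip-cursor never fires there while Python slicing counts from the end) and, writing
-- 'reduced' for itemset2 with position pos_removed dropped, excludes exactly the inputs on
-- which itemset1 strictly extends reduced while agreeing with all of it — there both A and B
-- run off the end of the second sequence and raise IndexError.
def Pre_same_as (itemset1 : List Int) (itemset2 : List Int) (pos_removed : Int) : Prop :=
  0 ≤ pos_removed ∧
    (itemset1.length
        ≤ (itemset2.take pos_removed.toNat ++ itemset2.drop (pos_removed.toNat + 1)).length ∨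
     itemset1.take (itemset2.take pos_removed.toNat ++ itemset2.drop (pos_removed.toNat + 1)).length
        ≠ itemset2.take pos_removed.toNat ++ itemset2.drop (pos_removed.toNat + 1))
instance (itemset1 : List Int) (itemset2 : List Int) (pos_removed : Int) : Decidable (Pre_same_as itemset1 itemset2 pos_removed) := by unfold Pre_same_as; infer_instance

def pvWitness_same_as : List Int × List Int × Int := ([1, 2], [1, 2, 3], 1)

def Spec_same_as (itemset1 : List Int) (itemset2 : List Int) (pos_removed : Int) (out : Int) : Prop := out = same_as_alt itemset1 itemset2 pos_removed
instance (itemset1 : List Int) (itemset2 : List Int) (pos_removed : Int) (out : Int) : Decidable (Spec_same_as itemset1 itemset2 pos_removed out) := by unfold Spec_same_as; infer_instance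

-- ===== CLAIM (what is proved, stated in full; the proofs are below) =====
def Claim_equal_same_as : Prop := ∀ (itemset1 : List Int) (itemset2 : List Int) (pos_removed : Int), Dom_same_as itemset1 itemset2 pos_removed → Pre_same_as itemset1 itemset2 pos_removed → Spec_same_as itemset1 itemset2 pos_removed (same_as itemset1 itemset2 pos_removed)

-- ===== LEMMAS AND PROOFS =====

-- common reference: plain structural lexicographic compare (0 if either side runs out)
def lexCmp : List Int → List Int → Int
  | [], _ => 0
  | _ :: _, [] => 0
  | x :: xs, y :: ys =>
      if x < y then -1 else if x > y then 1 else lexCmp xs ys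

-- "the compare loop cannot run off the end of ys": either xs is short enough,
-- or some position within ys differs
def NoOverrun (xs ys : List Int) : Prop :=
  xs.length ≤ ys.length ∨ xs.take ys.length ≠ ys

theorem noOverrun_tail (x y : Int) (xs ys : List Int) (hxy : x = y)
    (h : NoOverrun (x :: xs) (y :: ys)) : NoOverrun xs ys := by
  rcases h with h | h
  · left; simpa using h
  · right
    intro hc
    exact h (by simp [List.take_succ_cons, hxy, hc])

theorem noOverrun_ne_nil (x : Int) (xs : List Int) (h : NoOverrun (x :: xs) []) : False := by
  rcases h with h | h <;> simp at h

-- B's index loop is lexCmp of the suffixes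
theorem cmpLoop_eq_lexCmp (xs ys : List Int) (i : Nat)
    (hsafe : NoOverrun (xs.drop i) (ys.drop i)) :
    cmpLoop xs ys i = lexCmp (xs.drop i) (ys.drop i) := by
  suffices H : ∀ n i, xs.length - i = n → NoOverrun (xs.drop i) (ys.drop i) →
      cmpLoop xs ys i = lexCmp (xs.drop i) (ys.drop i) from H _ i rfl hsafe
  intro n
  induction n using Nat.strong_induction_on with
  | _ n ih =>
    intro i hn hsafe
    by_cases h : i < xs.length
    · have hys : i < ys.length := by
        by_contra hys
        rw [List.drop_eq_nil_of_le (as := ys) (by omega)] at hsafe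
        rw [List.drop_eq_getElem_cons h] at hsafe
        exact noOverrun_ne_nil _ _ hsafe
      have hdx := List.drop_eq_getElem_cons h
      have hdy := List.drop_eq_getElem_cons hys
      have hy : PySem.List.pyGetD ys (i : Int) 0 = ys[i] := by
        simp [PySem.List.pyGetD_natCast, List.getD_eq_getElem?_getD,
          List.getElem?_eq_getElem hys]
      rw [cmpLoop, dif_pos h, hdx, hdy, lexCmp]
      simp only [hy]
      split_ifs with h1 h2
      · rfl
      · rfl
      · have hsafe' : NoOverrun (xs.drop (i + 1)) (ys.drop (i + 1)) := by
          rw [hdx, hdy] at hsafe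
          exact noOverrun_tail _ _ _ _ (by omega) hsafe
        rw [ih (xs.length - (i + 1)) (by omega) (i + 1) rfl hsafe']
    · rw [cmpLoop, dif_neg h, List.drop_eq_nil_of_le (by omega), lexCmp]

-- A's loop when the skip can no longer fire: plain compare against itemset2 from index j
theorem sameAsLoop_noskip (itemset2 : List Int) (pos : Int) (rest : List Int) (j : Nat)
    (hj : pos < (j : Int) ∨ (itemset2.length : Int) ≤ pos)
    (hsafe : NoOverrun rest (itemset2.drop j)) :
    sameAsLoop itemset2 pos rest (j : Int) = lexCmp rest (itemset2.drop j) := by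
  induction rest generalizing j with
  | nil => rw [sameAsLoop, lexCmp]
  | cons x rest ih =>
      have hjlt : j < itemset2.length := by
        by_contra hc
        rw [List.drop_eq_nil_of_le (by omega)] at hsafe
        exact noOverrun_ne_nil _ _ hsafe
      have hne : (j : Int) ≠ pos := by rcases hj with h | h <;> omega
      have hdy := List.drop_eq_getElem_cons hjlt
      rw [sameAsLoop, hdy, lexCmp]
      have hy : PySem.List.pyGetD itemset2 (j : Int) 0 = itemset2[j] := by
        simp [PySem.List.pyGetD_natCast, List.getD_eq_getElem?_getD,
          List.getElem?_eq_getElem hjlt]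
      rw [if_neg hne]
      simp only [hy]
      split_ifs with h1 h2
      · rfl
      · rfl
      · have hc : (j : Int) + 1 = ((j + 1 : Nat) : Int) := by push_cast; ring
        have hsafe' : NoOverrun rest (itemset2.drop (j + 1)) := by
          rw [hdy] at hsafe
          exact noOverrun_tail _ _ _ _ (by omega) hsafe
        rw [hc, ih (j + 1) (by rcases hj with h | h <;> [left; right] <;> omega) hsafe']

-- A's loop before the skip: compare against the reduced list from index j
theorem sameAsLoop_pre (itemset2 : List Int) (pos : Int) (rest : List Int) (j : Nat)
    (hj : (j : Int) ≤ pos) (hpos : pos < (itemset2.length : Int))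
    (hsafe : NoOverrun rest ((itemset2.take pos.toNat ++ itemset2.drop (pos.toNat + 1)).drop j)) :
    sameAsLoop itemset2 pos rest (j : Int)
      = lexCmp rest ((itemset2.take pos.toNat ++ itemset2.drop (pos.toNat + 1)).drop j) := by
  induction rest generalizing j with
  | nil => rw [sameAsLoop, lexCmp]
  | cons x rest ih =>
      have h0pos : (0 : Int) ≤ pos := by omega
      set p := pos.toNat with hp
      have hpc : (p : Int) = pos := Int.toNat_of_nonneg h0pos
      have hplt : p < itemset2.length := by omega
      have htlen : (itemset2.take p).length = p := by simp; omega
      have hflen : (itemset2.take p ++ itemset2.drop (p + 1)).length = itemset2.length - 1 := by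
        simp; omega
      have hjflt : j < (itemset2.take p ++ itemset2.drop (p + 1)).length := by
        by_contra hc
        rw [List.drop_eq_nil_of_le (by omega)] at hsafe
        exact noOverrun_ne_nil _ _ hsafe
      by_cases hjp : (j : Int) = pos
      · -- the skip fires: compare against itemset2[p+1], then plain from p+2
        have hjep : j = p := by omega
        have hp1 : p + 1 < itemset2.length := by omega
        rw [sameAsLoop, if_pos hjp]
        have hcast1 : pos + 1 = ((p + 1 : Nat) : Int) := by push_cast; omega
        have hy : PySem.List.pyGetD itemset2 (pos + 1) 0 = itemset2[p + 1] := by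
          rw [hcast1, PySem.List.pyGetD_natCast, List.getD_eq_getElem?_getD,
            List.getElem?_eq_getElem hp1, Option.getD_some]
        have hdrop : (itemset2.take p ++ itemset2.drop (p + 1)).drop j
            = itemset2[p + 1] :: itemset2.drop (p + 2) := by
          rw [hjep, List.drop_left' htlen, List.drop_eq_getElem_cons hp1]
        rw [hdrop, lexCmp]
        simp only [hy, hjp]
        split_ifs with h1 h2
        · rfl
        · rfl
        · have hcast2 : pos + 1 + 1 = ((p + 2 : Nat) : Int) := by push_cast; omega
          have hsafe' : NoOverrun rest (itemset2.drop (p + 2)) := by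
            rw [hdrop] at hsafe
            exact noOverrun_tail _ _ _ _ (by omega) hsafe
          rw [hcast2, sameAsLoop_noskip itemset2 pos rest (p + 2) (by left; omega) hsafe']
      · -- no skip yet: compare against itemset2[j] = filtered[j]
        have hjlt : j < p := by omega
        have hjlen : j < itemset2.length := by omega
        have hdy := List.drop_eq_getElem_cons hjflt
        rw [sameAsLoop, if_neg hjp]
        have hy : PySem.List.pyGetD itemset2 (j : Int) 0 = itemset2[j] := by
          simp [PySem.List.pyGetD_natCast, List.getD_eq_getElem?_getD,
            List.getElem?_eq_getElem hjlen]
        have hfj : (itemset2.take p ++ itemset2.drop (p + 1))[j] = itemset2[j] := by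
          rw [List.getElem_append_left (by omega)]
          simp
        rw [hdy, lexCmp, hfj]
        simp only [hy]
        split_ifs with h1 h2
        · rfl
        · rfl
        · have hc : (j : Int) + 1 = ((j + 1 : Nat) : Int) := by push_cast; ring
          have hsafe' : NoOverrun rest
              ((itemset2.take p ++ itemset2.drop (p + 1)).drop (j + 1)) := by
            rw [hdy, hfj] at hsafe
            exact noOverrun_tail _ _ _ _ (by omega) hsafe
          rw [hc, ih (j + 1) (by omega) hsafe']

-- ===== VERDICT (by name: the statement is the Claim_ definition above) =====
theorem same_as_spec : Claim_equal_same_as := by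
  intro itemset1 itemset2 pos _hdom hpre
  obtain ⟨hpos, hsafe0⟩ := hpre
  unfold Spec_same_as same_as same_as_alt
  set p := pos.toNat with hp
  have hpc : (p : Int) = pos := Int.toNat_of_nonneg hpos
  have hsafe : NoOverrun itemset1 (itemset2.take p ++ itemset2.drop (p + 1)) := hsafe0
  by_cases hlt : pos < (itemset2.length : Int)
  · -- pos indexes itemset2: filtered = take p ++ drop (p+1)
    have hfil : PySem.List.slice itemset2 none (some pos)
        ++ PySem.List.slice itemset2 (some (pos + 1)) none
        = itemset2.take p ++ itemset2.drop (p + 1) := by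
      rw [← hpc, PySem.List.slice_to_natCast]
      have : (p : Int) + 1 = ((p + 1 : Nat) : Int) := by push_cast; ring
      rw [this, PySem.List.slice_from_natCast]
    have hA : sameAsLoop itemset2 pos itemset1 ((0 : Nat) : Int)
        = lexCmp itemset1 ((itemset2.take p ++ itemset2.drop (p + 1)).drop 0) :=
      sameAsLoop_pre itemset2 pos itemset1 0 (by omega) (by omega)
        (by rw [List.drop_zero]; exact hsafe)
    simp only [hfil, Nat.cast_zero, List.drop_zero] at *
    rw [hA, cmpLoop_eq_lexCmp _ _ 0 (by simp only [List.drop_zero]; exact hsafe)]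
    simp only [List.drop_zero]
  · -- pos past the end: the skip never fires and filtered = itemset2
    have hred : itemset2.take p ++ itemset2.drop (p + 1) = itemset2 := by
      rw [List.take_of_length_le (by omega), List.drop_eq_nil_of_le (by omega),
        List.append_nil]
    rw [hred] at hsafe
    have hfil : PySem.List.slice itemset2 none (some pos)
        ++ PySem.List.slice itemset2 (some (pos + 1)) none = itemset2 := by
      rw [← hpc, PySem.List.slice_to_natCast]
      have : (p : Int) + 1 = ((p + 1 : Nat) : Int) := by push_cast; ring
      rw [this, PySem.List.slice_from_natCast, hred]
    have hA : sameAsLoop itemset2 pos itemset1 ((0 : Nat) : Int)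
        = lexCmp itemset1 (itemset2.drop 0) :=
      sameAsLoop_noskip itemset2 pos itemset1 0 (by right; omega)
        (by rw [List.drop_zero]; exact hsafe)
    simp only [hfil, Nat.cast_zero, List.drop_zero] at *
    rw [hA, cmpLoop_eq_lexCmp _ _ 0 (by simp only [List.drop_zero]; exact hsafe)]
    simp only [List.drop_zero]
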